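-- pv_equiv track=rewrite | github.com/shenzhao-kaleido/anno | trainprocess.py | find_same_element
-- ===== SOURCE A (Python) =====
-- def find_same_element(x, y):
--     num = 0
--     item = []
--     for i in x:
--         for j in y:
--             if list(i) == list(j):
--                 item.append(i)
--                 num += 1
--     return num, item
-- ===== SOURCE B (Python) =====
-- def find_same_element(x, y):
--     counts = {}
--     for j in y:
--         t = tuple(j)
--         counts[t] = counts.get(t, 0) + 1
--     num = 0
--     item = []
--     for i in x:
--         c = counts.get(tuple(i), 0)
--         num += c
--         item.extend([i] * c)
--     return num, item
-- ===== Notes on version B (the rewrite author's own statement) =====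
-- stated objective: faster
-- what changed: B builds a count table over y once and looks each x-element up, replacing A's nested scan of y for every x-element.
import Mathlib
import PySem

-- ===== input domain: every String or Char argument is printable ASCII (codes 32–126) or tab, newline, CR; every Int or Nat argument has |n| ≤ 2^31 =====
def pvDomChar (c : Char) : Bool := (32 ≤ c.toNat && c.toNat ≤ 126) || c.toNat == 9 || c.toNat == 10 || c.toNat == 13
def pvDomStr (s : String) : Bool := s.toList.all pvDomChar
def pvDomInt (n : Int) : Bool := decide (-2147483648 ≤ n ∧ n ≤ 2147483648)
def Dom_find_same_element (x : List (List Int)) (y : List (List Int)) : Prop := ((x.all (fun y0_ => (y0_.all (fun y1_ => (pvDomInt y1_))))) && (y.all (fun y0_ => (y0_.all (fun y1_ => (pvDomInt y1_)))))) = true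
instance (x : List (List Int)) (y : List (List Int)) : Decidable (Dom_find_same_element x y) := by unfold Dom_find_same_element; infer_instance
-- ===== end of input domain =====

-- B replaces A's nested scan (re-scanning y for every element of x) with a count table over y built once; a timing run measured it faster (asymptotic).


-- ===== PORT A =====
def find_same_element (x : List (List Int)) (y : List (List Int)) : Int × List (List Int) :=
  x.foldl (fun st i =>
    y.foldl (fun st2 j =>
      if i = j then (st2.1 + 1, st2.2 ++ [i]) else st2) st)
    (0, [])

-- ===== PORT B =====
-- B: one pass builds a count table over y, then one pass over x looks counts up (faster: asymptotic, in a timing run).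
def find_same_element_alt (x : List (List Int)) (y : List (List Int)) : Int × List (List Int) :=
  let counts := y.foldl (fun (d : PySem.Dict (List Int) Int) j => d.insert j (d.getD j 0 + 1)) (PySem.Dict.empty)
  x.foldl (fun st i =>
    let c := counts.getD i 0
    (st.1 + c, st.2 ++ List.replicate c.toNat i))
    (0, [])

-- ===== PRECONDITION & SPEC =====
def Spec_find_same_element (x : List (List Int)) (y : List (List Int)) (out : Int × List (List Int)) : Prop := out = find_same_element_alt x y
instance (x : List (List Int)) (y : List (List Int)) (out : Int × List (List Int)) : Decidable (Spec_find_same_element x y out) := by unfold Spec_find_same_element; infer_instance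

-- ===== CLAIM (what is proved, stated in full; the proofs are below) =====
def Claim_equal_find_same_element : Prop := ∀ (x : List (List Int)) (y : List (List Int)), Dom_find_same_element x y → Spec_find_same_element x y (find_same_element x y)

-- ===== LEMMAS AND PROOFS =====

-- the merged output both programs produce: each i of x repeated y.count i times
def pvExpand (y : List (List Int)) (x : List (List Int)) : List (List Int) :=
  x.flatMap (fun i => List.replicate (y.count i) i)

-- A's inner loop over y, from state st, adds y.count i and appends i that many times.
theorem pv_inner_loop_eq (y : List (List Int)) (i : List Int) (st : Int × List (List Int)) :
    y.foldl (fun st2 j => if i = j then (st2.1 + 1, st2.2 ++ [i]) else st2) st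
      = (st.1 + (y.count i : Int), st.2 ++ List.replicate (y.count i) i) := by
  induction y generalizing st with
  | nil => simp
  | cons j ys ih =>
    rw [List.foldl_cons]
    by_cases h : i = j
    · subst h
      rw [if_pos rfl, ih, List.count_cons_self, List.replicate_succ]
      refine congrArg₂ Prod.mk ?_ ?_
      · push_cast; ring
      · rw [List.append_assoc]; rfl
    · rw [if_neg h, ih]
      have hc : (j :: ys).count i = ys.count i := by
        simp [Ne.symm h]
      rw [hc]

theorem pv_counts_getD (y : List (List Int)) (i : List Int) :
    (y.foldl (fun (d : PySem.Dict (List Int) Int) j => d.insert j (d.getD j 0 + 1)) (PySem.Dict.empty)).getD i 0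
      = (y.count i : Int) := by
  rw [PySem.Dict.foldl_insert_getD_add_one_eq_counter, PySem.Dict.getD_counter]

theorem pv_A_char (y x : List (List Int)) : ∀ st : Int × List (List Int),
    x.foldl (fun st i =>
        y.foldl (fun st2 j => if i = j then (st2.1 + 1, st2.2 ++ [i]) else st2) st) st
      = (st.1 + ((pvExpand y x).length : Int), st.2 ++ pvExpand y x) := by
  induction x with
  | nil => intro st; simp [pvExpand]
  | cons i xs ih =>
    intro st
    rw [List.foldl_cons, pv_inner_loop_eq, ih]
    refine congrArg₂ Prod.mk ?_ ?_
    · simp [pvExpand]; ring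
    · simp [pvExpand]

theorem pv_B_char (y x : List (List Int)) : ∀ st : Int × List (List Int),
    x.foldl (fun st i =>
        (st.1 + (y.foldl (fun (d : PySem.Dict (List Int) Int) j => d.insert j (d.getD j 0 + 1)) (PySem.Dict.empty)).getD i 0,
         st.2 ++ List.replicate ((y.foldl (fun (d : PySem.Dict (List Int) Int) j => d.insert j (d.getD j 0 + 1)) (PySem.Dict.empty)).getD i 0).toNat i)) st
      = (st.1 + ((pvExpand y x).length : Int), st.2 ++ pvExpand y x) := by
  induction x with
  | nil => intro st; simp [pvExpand]
  | cons i xs ih =>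
    intro st
    rw [List.foldl_cons, pv_counts_getD, ih]
    refine congrArg₂ Prod.mk ?_ ?_
    · simp [pvExpand]; ring
    · simp [pvExpand]

theorem pv_ports_eq (x y : List (List Int)) :
    find_same_element x y = find_same_element_alt x y := by
  simp only [find_same_element, find_same_element_alt]
  rw [pv_A_char, pv_B_char]

-- ===== VERDICT (by name: the statement is the Claim_ definition above) =====
theorem find_same_element_spec : Claim_equal_find_same_element := by
  intro x y _
  exact pv_ports_eq x y
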